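-- pv_equiv track=rewrite | github.com/NeeleKemper/moevorl-ev-cm | envs/ev_charging_test/ev_charging_test.py | __find_non_zero_sequences
-- ===== SOURCE A (Python) =====
-- def __find_non_zero_sequences(lst):
--     sequences = []
--     start = None
--
--     for i in range(len(lst)):
--         if lst[i] != 0 and start is None:
--             start = lst[i]  # Start of a new sequence
--         elif lst[i] == 0 and start is not None:
--             sequences.append((start, lst[i - 1]))
--             # End of the current sequence
--             start = None  # Reset for the next sequence
--
--     # Check if the last sequence goes till the end of the list
--     if start is not None:
--         sequences.append((start, lst[-1]))
--     return sequences
-- ===== SOURCE B (Python) =====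
-- def __find_non_zero_sequences(lst):
--     # Two-pointer scan: jump over each whole non-zero run at once instead of
--     # keeping a start/None state machine with lst[i-1] lookups.
--     res = []
--     i = 0
--     n = len(lst)
--     while i < n:
--         if lst[i] == 0:
--             i += 1
--         else:
--             j = i
--             while j + 1 < n and lst[j + 1] != 0:
--                 j += 1
--             res.append((lst[i], lst[j]))
--             i = j + 1
--     return res
-- ===== Notes on version B (the rewrite author's own statement) =====
-- stated objective: alternative
-- what changed: Replaces A's start/None state machine with lst[i-1] backward lookups by a two-pointer scan that locates each maximal non-zero run with an inner pointer and emits (lst[i], lst[j]) directly.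
import Mathlib
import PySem

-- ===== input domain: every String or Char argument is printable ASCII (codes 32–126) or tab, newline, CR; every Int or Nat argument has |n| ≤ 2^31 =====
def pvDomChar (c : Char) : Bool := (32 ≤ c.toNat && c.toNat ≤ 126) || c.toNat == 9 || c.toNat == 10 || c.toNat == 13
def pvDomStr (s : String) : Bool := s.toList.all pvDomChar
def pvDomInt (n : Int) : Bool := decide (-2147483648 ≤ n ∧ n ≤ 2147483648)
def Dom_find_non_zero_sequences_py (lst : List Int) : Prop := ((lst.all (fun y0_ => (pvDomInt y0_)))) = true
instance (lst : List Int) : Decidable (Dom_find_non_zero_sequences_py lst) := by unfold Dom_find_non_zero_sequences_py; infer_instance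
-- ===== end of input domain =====

-- B replaces A's start/None state machine (with its lst[i-1] lookups and trailing-run check)
-- by a two-pointer scan that finds each maximal non-zero run at once; objective: alternative.

-- ===== PORT A =====
-- A's 'for i in range(len(lst))' loop, as structural recursion on the remaining index count.
-- lst[i] and lst[i-1] are ported as lst.getD _ 0: within this loop i is always in range, and the
-- elif branch reading lst[i-1] only fires with start ≠ none, which forces i ≥ 1 (exact there).
def aLoop (lst : List Int) (i : Nat) (seqs : List (Int × Int)) (start : Option Int) :
    List (Int × Int) × Option Int :=
  if h : i < lst.length then
    if lst.getD i 0 ≠ 0 ∧ start = none then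
      aLoop lst (i + 1) seqs (some (lst.getD i 0))
    else if lst.getD i 0 = 0 ∧ start ≠ none then
      aLoop lst (i + 1) (seqs ++ [(start.getD 0, lst.getD (i - 1) 0)]) none
    else
      aLoop lst (i + 1) seqs start
  else (seqs, start)
termination_by lst.length - i
decreasing_by all_goals omega

def find_non_zero_sequences_py (lst : List Int) : List (Int × Int) :=
  match aLoop lst 0 [] none with
  | (seqs, some v) => seqs ++ [(v, ((PySem.List.pyGet? lst (-1)).getD 0))]  -- lst[-1]; list nonempty here
  | (seqs, none) => seqs

-- ===== PORT B =====
-- inner 'while j + 1 < n and lst[j + 1] != 0' of Source B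
def bScan (lst : List Int) (j : Nat) : Nat :=
  if j + 1 < lst.length ∧ lst.getD (j + 1) 0 ≠ 0 then bScan lst (j + 1) else j
termination_by lst.length - j
decreasing_by omega

theorem bScan_ge (lst : List Int) (j : Nat) : j ≤ bScan lst j := by
  unfold bScan
  split
  · have := bScan_ge lst (j + 1); omega
  · omega
termination_by lst.length - j
decreasing_by omega

-- outer 'while i < n' of Source B
def bLoop (lst : List Int) (res : List (Int × Int)) (i : Nat) : List (Int × Int) :=
  if h : i < lst.length then
    if lst.getD i 0 = 0 then bLoop lst res (i + 1)
    else
      let j := bScan lst i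
      bLoop lst (res ++ [(lst.getD i 0, lst.getD j 0)]) (j + 1)
  else res
termination_by lst.length - i
decreasing_by
  · omega
  · have := bScan_ge lst i; omega

def find_non_zero_sequences_py_alt (lst : List Int) : List (Int × Int) :=
  bLoop lst [] 0

-- ===== PRECONDITION & SPEC =====
def Spec_find_non_zero_sequences_py (lst : List Int) (out : List (Int × Int)) : Prop := out = find_non_zero_sequences_py_alt lst
instance (lst : List Int) (out : List (Int × Int)) : Decidable (Spec_find_non_zero_sequences_py lst out) := by unfold Spec_find_non_zero_sequences_py; infer_instance

-- ===== CLAIM (what is proved, stated in full; the proofs are below) =====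
def Claim_equal_find_non_zero_sequences_py : Prop := ∀ (lst : List Int), Dom_find_non_zero_sequences_py lst → Spec_find_non_zero_sequences_py lst (find_non_zero_sequences_py lst)

-- ===== LEMMAS AND PROOFS =====

-- Common specification: split the list into maximal non-zero runs, emit (first, last) of each.
-- runEnd last ys = (last element of the run continuing with ys, the rest starting at the first 0)
def runEnd (last : Int) : List Int → Int × List Int
  | [] => (last, [])
  | y :: ys => if y = 0 then (last, y :: ys) else runEnd y ys

theorem runEnd_nil (last : Int) : runEnd last [] = (last, []) := rfl
theorem runEnd_cons (last y : Int) (ys : List Int) :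
    runEnd last (y :: ys) = if y = 0 then (last, y :: ys) else runEnd y ys := rfl

theorem runEnd_len (last : Int) (ys : List Int) : (runEnd last ys).2.length ≤ ys.length := by
  induction ys generalizing last with
  | nil => simp [runEnd_nil]
  | cons y ys ih =>
    rw [runEnd_cons]
    split
    · simp
    · have := ih y; simp; omega

def rs : List Int → List (Int × Int)
  | [] => []
  | x :: xs =>
    if x = 0 then rs xs
    else (x, (runEnd x xs).1) :: rs (runEnd x xs).2
termination_by l => l.length
decreasing_by
  · simp
  · have := runEnd_len x xs; simp; omega

theorem rs_nil : rs [] = [] := by rw [rs]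
theorem rs_cons (x : Int) (xs : List Int) :
    rs (x :: xs) = if x = 0 then rs xs else (x, (runEnd x xs).1) :: rs (runEnd x xs).2 := by
  rw [rs]

theorem drop_succ_cons (lst : List Int) (i : Nat) (h : i < lst.length) :
    lst.drop i = lst.getD i 0 :: lst.drop (i + 1) := by
  rw [List.getD_eq_getElem lst 0 h]
  exact (List.getElem_cons_drop h).symm

-- B's scan finds exactly the end of the current run.
theorem bScan_runEnd (lst : List Int) (i : Nat) (h : i < lst.length) :
    runEnd (lst.getD i 0) (lst.drop (i + 1)) =
      (lst.getD (bScan lst i) 0, lst.drop (bScan lst i + 1)) := by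
  unfold bScan
  split
  · rename_i hc
    rw [drop_succ_cons lst (i + 1) hc.1, runEnd_cons, if_neg hc.2]
    exact bScan_runEnd lst (i + 1) hc.1
  · rename_i hc
    by_cases hlen : i + 1 < lst.length
    · have hz : lst.getD (i + 1) 0 = 0 := by
        by_contra hnz; exact hc ⟨hlen, hnz⟩
      rw [drop_succ_cons lst (i + 1) hlen, runEnd_cons, if_pos hz, ← drop_succ_cons lst (i + 1) hlen]
    · have hnil : lst.drop (i + 1) = [] := by
        apply List.drop_eq_nil_of_le; omega
      rw [hnil, runEnd_nil]
termination_by lst.length - i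
decreasing_by omega

theorem bLoop_eq_rs (lst : List Int) (res : List (Int × Int)) (i : Nat) :
    bLoop lst res i = res ++ rs (lst.drop i) := by
  unfold bLoop
  split
  · rename_i h
    by_cases hz : lst.getD i 0 = 0
    · rw [if_pos hz, bLoop_eq_rs lst res (i + 1)]
      rw [drop_succ_cons lst i h, rs_cons, if_pos hz]
    · rw [if_neg hz]
      rw [bLoop_eq_rs lst (res ++ [(lst.getD i 0, lst.getD (bScan lst i) 0)]) (bScan lst i + 1)]
      rw [drop_succ_cons lst i h, rs_cons, if_neg hz, bScan_runEnd lst i h]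
      simp
  · rename_i h
    have hnil : lst.drop i = [] := by apply List.drop_eq_nil_of_le; omega
    rw [hnil, rs_nil, List.append_nil]
termination_by lst.length - i
decreasing_by all_goals (have := bScan_ge lst i; omega)

-- A's trailing 'if start is not None: append (start, lst[-1])' step.
def finishA (lst : List Int) : List (Int × Int) × Option Int → List (Int × Int)
  | (seqs, some v) => seqs ++ [(v, ((PySem.List.pyGet? lst (-1)).getD 0))]
  | (seqs, none) => seqs

theorem terminal_none (lst : List Int) (i : Nat) (seqs : List (Int × Int))
    (h : ¬ i < lst.length) :
    finishA lst (aLoop lst i seqs none) = seqs ++ rs (lst.drop i) := by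
  rw [aLoop, dif_neg h]
  have hnil : lst.drop i = [] := by apply List.drop_eq_nil_of_le; omega
  rw [hnil, rs_nil, List.append_nil]
  rfl

theorem terminal_some (lst : List Int) (i : Nat) (seqs : List (Int × Int)) (v : Int)
    (h : ¬ i < lst.length) (hi : i ≤ lst.length) (_h1 : 1 ≤ i) :
    finishA lst (aLoop lst i seqs (some v)) =
      seqs ++ (v, (runEnd (lst.getD (i - 1) 0) (lst.drop i)).1) ::
        rs ((runEnd (lst.getD (i - 1) 0) (lst.drop i)).2) := by
  rw [aLoop, dif_neg h]
  have hi' : i = lst.length := by omega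
  have hnil : lst.drop i = [] := by apply List.drop_eq_nil_of_le; omega
  have hlast : (PySem.List.pyGet? lst (-1)).getD 0 = lst.getD (i - 1) 0 := by
    rw [PySem.List.pyGet?_neg_one, List.getLast?_eq_getElem?, List.getD_eq_getElem?_getD, hi']
  rw [hnil, runEnd_nil, rs_nil]
  show seqs ++ [(v, (PySem.List.pyGet? lst (-1)).getD 0)] = seqs ++ [(v, lst.getD (i - 1) 0)]
  rw [hlast]

-- A's state machine, run to completion, computes the run specification as well.
theorem aLoop_eq_rs (lst : List Int) (k i : Nat) (seqs : List (Int × Int))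
    (hk : lst.length - i ≤ k) (hi : i ≤ lst.length) :
    (finishA lst (aLoop lst i seqs none) = seqs ++ rs (lst.drop i)) ∧
    (∀ v : Int, 1 ≤ i →
      finishA lst (aLoop lst i seqs (some v)) =
        seqs ++ (v, (runEnd (lst.getD (i - 1) 0) (lst.drop i)).1) ::
          rs ((runEnd (lst.getD (i - 1) 0) (lst.drop i)).2)) := by
  induction k generalizing i seqs with
  | zero =>
    have h : ¬ i < lst.length := by omega
    exact ⟨terminal_none lst i seqs h, fun v h1 => terminal_some lst i seqs v h hi h1⟩
  | succ k ih =>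
    by_cases h : i < lst.length
    · have hd := drop_succ_cons lst i h
      constructor
      · rw [aLoop, dif_pos h]
        by_cases hz : lst.getD i 0 = 0
        · rw [if_neg (fun hc => hc.1 hz), if_neg (by simp)]
          rw [(ih (i + 1) seqs (by omega) (by omega)).1]
          rw [hd, rs_cons, if_pos hz]
        · rw [if_pos ⟨hz, rfl⟩]
          rw [(ih (i + 1) seqs (by omega) (by omega)).2 (lst.getD i 0) (by omega)]
          have he : (i + 1) - 1 = i := by omega
          rw [he, hd, rs_cons, if_neg hz]
      · intro v h1
        rw [aLoop, dif_pos h]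
        by_cases hz : lst.getD i 0 = 0
        · rw [if_neg (fun hc => hc.1 hz), if_pos ⟨hz, by simp⟩]
          simp only [Option.getD_some]
          rw [(ih (i + 1) (seqs ++ [(v, lst.getD (i - 1) 0)]) (by omega) (by omega)).1]
          rw [hd, runEnd_cons, if_pos hz, rs_cons, if_pos hz]
          simp
        · rw [if_neg (by simp), if_neg (fun hc => hz hc.1)]
          rw [(ih (i + 1) seqs (by omega) (by omega)).2 v (by omega)]
          have he : (i + 1) - 1 = i := by omega
          rw [he, hd, runEnd_cons, if_neg hz]
    · exact ⟨terminal_none lst i seqs h, fun v h1 => terminal_some lst i seqs v h hi h1⟩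

theorem portA_eq_rs (lst : List Int) : find_non_zero_sequences_py lst = rs lst := by
  have h := (aLoop_eq_rs lst lst.length 0 [] (by omega) (by omega)).1
  have hfin : find_non_zero_sequences_py lst = finishA lst (aLoop lst 0 [] none) := by
    unfold find_non_zero_sequences_py finishA
    rcases aLoop lst 0 [] none with ⟨s, st⟩
    cases st <;> rfl
  rw [hfin, h]
  simp

theorem portB_eq_rs (lst : List Int) : find_non_zero_sequences_py_alt lst = rs lst := by
  unfold find_non_zero_sequences_py_alt
  rw [bLoop_eq_rs]
  simp

-- ===== VERDICT (by name: the statement is the Claim_ definition above) =====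
theorem find_non_zero_sequences_py_spec : Claim_equal_find_non_zero_sequences_py := by
  intro lst _
  unfold Spec_find_non_zero_sequences_py
  rw [portA_eq_rs, portB_eq_rs]
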